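-- pv_equiv track=rewrite | github.com/simonberner/coding-dojo-python | farkle.py | __score_three_different_pairs
-- ===== SOURCE A (Python) =====
-- def __score_three_different_pairs(array_of_dice):
--     dice_to_check = [1, 2, 3, 4, 5, 6]
--     array_of_dice_new = array_of_dice
--     pairs = 0
--     for dice in dice_to_check:
--         if array_of_dice_new.count(dice) == 2:
--             pairs += 1
--             # remove the dice from the array
--             array_of_dice_new = [x for x in array_of_dice_new if x != dice]
--     if pairs == 3:
--         # only if there are three different pairs we slice and thus assign the new array to the original array
--         array_of_dice[:] = array_of_dice_new
--         return 800
--     return 0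
-- ===== SOURCE B (Python) =====
-- def __score_three_different_pairs(array_of_dice):
--     s = sorted(array_of_dice)
--     paired = []
--     i = 0
--     n = len(s)
--     while i < n:
--         run = 1
--         while i + run < n and s[i + run] == s[i]:
--             run += 1
--         if run == 2 and 1 <= s[i] <= 6:
--             paired.append(s[i])
--         i += run
--     if len(paired) == 3:
--         array_of_dice[:] = [x for x in array_of_dice if x not in paired]
--         return 800
--     return 0
-- ===== Notes on version B (the rewrite author's own statement) =====
-- stated objective: alternative
-- what changed: B sorts the dice once and scans consecutive runs of the sorted list, collecting values whose run length is exactly 2 and lies in 1..6, instead of A's per-face .count scans with incremental list rebuilds over the six faces.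
import Mathlib
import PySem

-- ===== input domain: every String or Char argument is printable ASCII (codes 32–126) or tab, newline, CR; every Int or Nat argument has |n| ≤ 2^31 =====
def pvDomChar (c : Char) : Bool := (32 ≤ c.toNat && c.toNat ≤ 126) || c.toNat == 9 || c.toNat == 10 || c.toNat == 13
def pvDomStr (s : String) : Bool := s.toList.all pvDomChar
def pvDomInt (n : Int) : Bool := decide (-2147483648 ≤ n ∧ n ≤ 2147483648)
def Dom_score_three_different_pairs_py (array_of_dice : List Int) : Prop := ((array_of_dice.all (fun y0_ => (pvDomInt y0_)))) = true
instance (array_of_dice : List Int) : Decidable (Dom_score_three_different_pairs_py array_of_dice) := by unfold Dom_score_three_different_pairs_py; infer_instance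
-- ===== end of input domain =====

-- B sorts the dice once and scans consecutive runs of the sorted copy, collecting values whose
-- run length is exactly 2 and lies in 1..6, instead of A's per-face count scans with incremental
-- list rebuilds (alternative). Both A and B mutate array_of_dice in place when they return 800;
-- the theorems here are about the RETURN value only.

-- ===== PORT A =====
def score_three_different_pairs_py (array_of_dice : List Int) : Int :=
  let dice_to_check : List Int := [1, 2, 3, 4, 5, 6]
  -- state: (array_of_dice_new, pairs)
  let st := dice_to_check.foldl
    (fun (st : List Int × Int) dice =>
      if PySem.List.count st.1 dice = 2 then
        (st.1.filter (fun x => !(x == dice)), st.2 + 1)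
      else st)
    (array_of_dice, 0)
  if st.2 = 3 then 800 else 0

-- ===== PORT B =====
-- Source B's outer while-loop over the sorted list: each step consumes one maximal run
-- (the inner `while s[i+run] == s[i]` loop = takeWhile/dropWhile at the run's head).
def pvRunScan : List Int → List Int
  | [] => []
  | x :: xs =>
      let run := 1 + (xs.takeWhile (· == x)).length
      let rest := xs.dropWhile (· == x)
      if run = 2 ∧ 1 ≤ x ∧ x ≤ 6 then x :: pvRunScan rest else pvRunScan rest
termination_by l => l.length
decreasing_by
  all_goals
    simp only [List.length_cons]
    have := List.length_dropWhile_le (p := (· == x)) (l := xs)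
    omega

def score_three_different_pairs_py_alt (array_of_dice : List Int) : Int :=
  let s := PySem.List.sorted array_of_dice (fun x => x) false
  let paired := pvRunScan s
  if paired.length = 3 then 800 else 0

-- ===== PRECONDITION & SPEC =====
def Spec_score_three_different_pairs_py (array_of_dice : List Int) (out : Int) : Prop := out = score_three_different_pairs_py_alt array_of_dice
instance (array_of_dice : List Int) (out : Int) : Decidable (Spec_score_three_different_pairs_py array_of_dice out) := by unfold Spec_score_three_different_pairs_py; infer_instance

-- ===== CLAIM (what is proved, stated in full; the proofs are below) =====
def Claim_equal_score_three_different_pairs_py : Prop := ∀ (array_of_dice : List Int), Dom_score_three_different_pairs_py array_of_dice → Spec_score_three_different_pairs_py array_of_dice (score_three_different_pairs_py array_of_dice)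

-- ===== LEMMAS AND PROOFS =====

-- A's loop invariant: as long as the current list has the same counts as `f` on every
-- face still to be checked, the final `pairs` counter equals the number of those faces
-- whose count is exactly 2.
theorem pvA_fold_pairs (ds : List Int) (hnd : ds.Nodup) :
    ∀ (l : List Int) (p : Int) (f : Int → Nat), (∀ d ∈ ds, l.count d = f d) →
    (ds.foldl
      (fun (st : List Int × Int) dice =>
        if PySem.List.count st.1 dice = 2 then
          (st.1.filter (fun x => !(x == dice)), st.2 + 1)
        else st)
      (l, p)).2 = p + ((ds.filter (fun d => f d == 2)).length : Int) := by
  induction ds with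
  | nil => intro l p f _; simp
  | cons d rest ih =>
    intro l p f h
    have hd : l.count d = f d := h d (by simp)
    have hrest_nd : rest.Nodup := hnd.of_cons
    have hd_not : d ∉ rest := by
      intro hmem; exact (List.nodup_cons.mp hnd).1 hmem
    by_cases h2 : f d = 2
    · have : PySem.List.count l d = 2 := by
        simpa [PySem.List.count, hd] using h2
      simp only [List.foldl_cons, this, if_pos]
      rw [ih hrest_nd _ _ f ?_]
      · simp [h2]; ring
      · intro d' hd'
        have hne : d' ≠ d := fun he => hd_not (he ▸ hd')
        simp [List.count_filter, hne, h d' (List.mem_cons_of_mem _ hd')]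
    · have : ¬ PySem.List.count l d = 2 := by
        simpa [PySem.List.count, hd] using h2
      simp only [List.foldl_cons, if_neg this]
      rw [ih hrest_nd _ _ f (fun d' hd' => h d' (List.mem_cons_of_mem _ hd'))]
      simp [h2]

-- Head-run structure of a sorted list: the leading run of x has length = count of x,
-- and x does not occur after it.
theorem pvRun_count (x : Int) :
    ∀ (xs : List Int), (∀ v ∈ xs, x ≤ v) → xs.Pairwise (· ≤ ·) →
      xs.count x = (xs.takeWhile (· == x)).length ∧ (xs.dropWhile (· == x)).count x = 0 := by
  intro xs
  induction xs with
  | nil => intro _ _; simp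
  | cons y ys ih =>
    intro hle hp
    have hys_le : ∀ v ∈ ys, y ≤ v := fun v hv => (List.pairwise_cons.mp hp).1 v hv
    have hys_p : ys.Pairwise (· ≤ ·) := (List.pairwise_cons.mp hp).2
    by_cases hyx : y = x
    · subst hyx
      obtain ⟨h1, h2⟩ := ih (fun v hv => hys_le v hv) hys_p
      constructor
      · simp [h1]
      · simpa using h2
    · have hxy : x < y := lt_of_le_of_ne (hle y (by simp)) (Ne.symm hyx)
      have hnot : x ∉ y :: ys := by
        intro hmem
        rcases List.mem_cons.mp hmem with h | h
        · exact hyx h.symm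
        · exact absurd (hys_le x h) (by omega)
      have hbeq : ((y == x) : Bool) = false := by
        simp [hyx]
      constructor
      · simp [List.count_eq_zero.mpr hnot, hbeq]
      · simp [hbeq, List.count_eq_zero.mpr hnot]

-- Counts of other values are unchanged by dropping the head run.
theorem pvRest_count (x v : Int) (hne : v ≠ x) (xs : List Int) :
    (xs.dropWhile (· == x)).count v = xs.count v := by
  have h0 : (xs.takeWhile (· == x)).count v = 0 := by
    apply List.count_eq_zero.mpr
    intro hmem
    have := List.mem_takeWhile_imp hmem
    exact hne (by simpa using this)
  conv_rhs => rw [← List.takeWhile_append_dropWhile (p := (· == x)) (l := xs)]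
  simp only [List.count_append, h0, Nat.zero_add]

-- Counting matches over a duplicate-free face list: remove one distinguished value x.
theorem pvFilter_len_step (x : Int) (p q : Int → Bool) (hq : q x = false)
    (hagree : ∀ v, v ≠ x → p v = q v) :
    ∀ (faces : List Int), faces.Nodup →
      (faces.filter p).length =
        (if x ∈ faces ∧ p x = true then 1 else 0) + (faces.filter q).length := by
  intro faces
  induction faces with
  | nil => intro _; simp
  | cons f fs ih =>
    intro hnd
    have hfs_nd : fs.Nodup := hnd.of_cons
    by_cases hfx : f = x
    · subst hfx
      have hnot : f ∉ fs := (List.nodup_cons.mp hnd).1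
      have hfil : fs.filter p = fs.filter q := by
        apply List.filter_congr
        intro v hv
        exact hagree v (fun he => hnot (he ▸ hv))
      by_cases hpx : p f = true
      · simp [hpx, hq, hfil]
        omega
      · simp [hpx, hq, hfil]
    · have hpq : p f = q f := hagree f hfx
      have hxf : x ≠ f := fun h => hfx h.symm
      by_cases hpf : p f = true
      · have hqf : q f = true := hpq ▸ hpf
        simp only [List.filter_cons, hpf, hqf, if_true, List.length_cons,
          ih hfs_nd, List.mem_cons, hxf, false_or]
        omega
      · have hqf : ¬ q f = true := fun h => hpf (hpq ▸ h)
        simp only [List.filter_cons, hpf, hqf, Bool.false_eq_true, if_false, ih hfs_nd,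
          List.mem_cons, hxf, false_or]

-- Main characterisation of B's run scan on a sorted list.
theorem pvRunScan_len : ∀ (n : Nat) (l : List Int), l.length ≤ n → l.Pairwise (· ≤ ·) →
    (pvRunScan l).length =
      (([1, 2, 3, 4, 5, 6] : List Int).filter (fun d => l.count d == 2)).length := by
  intro n
  induction n with
  | zero =>
    intro l hl _
    have : l = [] := List.eq_nil_of_length_eq_zero (Nat.le_zero.mp hl)
    subst this
    simp [pvRunScan]
  | succ n ih =>
    intro l hl hp
    cases l with
    | nil => simp [pvRunScan]
    | cons x xs =>
      have hxs_le : ∀ v ∈ xs, x ≤ v := fun v hv => (List.pairwise_cons.mp hp).1 v hv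
      have hxs_p : xs.Pairwise (· ≤ ·) := (List.pairwise_cons.mp hp).2
      obtain ⟨hc, hc0⟩ := pvRun_count x xs hxs_le hxs_p
      have hrest_len : (xs.dropWhile (· == x)).length ≤ n := by
        have := List.length_dropWhile_le (p := (· == x)) (l := xs)
        simp only [List.length_cons] at hl
        omega
      have hrest_p : (xs.dropWhile (· == x)).Pairwise (· ≤ ·) :=
        hxs_p.sublist (List.dropWhile_sublist _)
      have hIH := ih (xs.dropWhile (· == x)) hrest_len hrest_p
      have hcount_x : (x :: xs).count x = 1 + (xs.takeWhile (· == x)).length := by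
        simp [hc]; omega
      have hstep := pvFilter_len_step x
        (fun d => (x :: xs).count d == 2)
        (fun d => (xs.dropWhile (· == x)).count d == 2)
        (by simp [hc0])
        (fun v hv => by
          have hvx : ¬ (x = v) := fun h => hv h.symm
          simp [pvRest_count x v hv xs, hvx])
        [1, 2, 3, 4, 5, 6] (by decide)
      have hmemfaces : (x ∈ ([1, 2, 3, 4, 5, 6] : List Int)) ↔ (1 ≤ x ∧ x ≤ 6) := by
        simp [List.mem_cons]
        omega
      have hiff : (x ∈ ([1, 2, 3, 4, 5, 6] : List Int) ∧ ((x :: xs).count x == 2) = true) ↔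
          (1 + (xs.takeWhile (· == x)).length = 2 ∧ 1 ≤ x ∧ x ≤ 6) := by
        simp only [hmemfaces, hcount_x, beq_iff_eq]
        tauto
      rw [hstep]
      simp only [pvRunScan, hiff]
      split_ifs with hcond
      · simp only [List.length_cons, hIH]
        omega
      · simp only [hIH, Nat.zero_add]

-- ===== VERDICT (by name: the statement is the Claim_ definition above) =====
theorem score_three_different_pairs_py_spec : Claim_equal_score_three_different_pairs_py := by
  intro l _
  unfold Spec_score_three_different_pairs_py score_three_different_pairs_py score_three_different_pairs_py_alt
  have hA := pvA_fold_pairs [1, 2, 3, 4, 5, 6] (by decide) l 0 (fun d => l.count d)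
    (fun _ _ => rfl)
  simp only [hA, zero_add]
  have hsorted := PySem.List.sorted_pairwise (xs := l) (key := fun x => x)
  have hperm : (PySem.List.sorted l (fun x => x) false).Perm l :=
    PySem.List.sorted_perm l (fun x => x) false
  have hB := pvRunScan_len (PySem.List.sorted l (fun x => x) false).length
    (PySem.List.sorted l (fun x => x) false) le_rfl hsorted
  have hcnt : ∀ d : Int, (PySem.List.sorted l (fun x => x) false).count d = l.count d :=
    fun d => hperm.count_eq d
  simp only [hB, hcnt]
  split_ifs <;> omega
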